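-- pv_equiv track=rewrite | github.com/kerBiy/ubb-computer-science | FP/lab 3/12.py | longestOppositeSignsSubSeq
-- ===== SOURCE A (Python) =====
-- def longestOppositeSignsSubSeq(nums: list[int]) -> list[int]:
--     max_length, curr_length = 0, 1
--     start_index = start_max = 0
--
--     for i in range(1, len(nums)):
--         if (nums[i] < 0 and nums[i - 1] >= 0) or (nums[i] >= 0 and nums[i - 1] < 0):
--             curr_length += 1
--         else:
--             if curr_length > max_length:
--                 max_length = curr_length
--                 start_max = start_index
--
--             curr_length = 1
--             start_index = i
--
--     if curr_length > max_length:
--         max_length = curr_length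
--         start_max = start_index
--
--     return nums[start_max : start_max + max_length]
-- ===== SOURCE B (Python) =====
-- def longestOppositeSignsSubSeq(nums: list[int]) -> list[int]:
--     if not nums:
--         return []
--     n = len(nums)
--     starts = [0] + [i for i in range(1, n) if (nums[i] < 0) == (nums[i - 1] < 0)]
--     ends = starts[1:] + [n]
--     best_s, best_e = 0, 0
--     for s, e in zip(starts, ends):
--         if e - s > best_e - best_s:
--             best_s, best_e = s, e
--     return nums[best_s:best_e]
-- ===== Notes on version B (the rewrite author's own statement) =====
-- stated objective: alternative
-- what changed: Replaced A's single running-state pass (current/max length with start indices) by a two-pass segment decomposition: compute the list of sign-break positions, form the segments they delimit, then pick the first strictly longest segment and slice it out.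
import Mathlib
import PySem

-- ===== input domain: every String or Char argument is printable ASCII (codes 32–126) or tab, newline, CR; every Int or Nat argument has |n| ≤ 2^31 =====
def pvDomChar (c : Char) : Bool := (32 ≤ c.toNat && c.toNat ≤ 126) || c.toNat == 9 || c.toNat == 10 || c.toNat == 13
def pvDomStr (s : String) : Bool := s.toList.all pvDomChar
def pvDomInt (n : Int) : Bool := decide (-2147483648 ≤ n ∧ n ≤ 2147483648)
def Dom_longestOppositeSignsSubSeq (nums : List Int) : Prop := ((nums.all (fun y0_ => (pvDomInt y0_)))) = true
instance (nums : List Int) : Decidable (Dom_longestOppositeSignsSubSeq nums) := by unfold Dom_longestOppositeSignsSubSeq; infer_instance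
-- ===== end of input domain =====

-- B re-decomposes the task into two passes (compute segment starts, then pick the first longest segment);
-- same return value as A on every input (objective: alternative decomposition, no speed claim).

-- ===== PORT A =====
-- loop body of A's single running-state pass
def stepA (nums : List Int) (st : Int × Int × Int × Int) (i : Int) : Int × Int × Int × Int :=
  if (PySem.List.pyGetD nums i 0 < 0 ∧ 0 ≤ PySem.List.pyGetD nums (i - 1) 0) ∨
     (0 ≤ PySem.List.pyGetD nums i 0 ∧ PySem.List.pyGetD nums (i - 1) 0 < 0) then
    (st.1, st.2.1 + 1, st.2.2.1, st.2.2.2)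
  else if st.2.1 > st.1 then (st.2.1, 1, i, st.2.2.1)
  else (st.1, 1, i, st.2.2.2)

def longestOppositeSignsSubSeq (nums : List Int) : List Int :=
  let st := (PySem.List.pyRange 1 (nums.length : Int) 1).foldl (stepA nums) (0, 1, 0, 0)
  let fin := if st.2.1 > st.1 then (st.2.1, st.2.2.1) else (st.1, st.2.2.2)
  PySem.List.slice nums (some fin.2) (some (fin.2 + fin.1))

-- ===== PORT B =====
-- Source B: break test (nums[i] < 0) == (nums[i-1] < 0)
def altBreak (nums : List Int) (i : Int) : Bool :=
  decide (PySem.List.pyGetD nums i 0 < 0) == decide (PySem.List.pyGetD nums (i - 1) 0 < 0)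

-- Source B: loop body keeping the first strictly longest (start, end) pair
def stepB (p : Int × Int) (se : Int × Int) : Int × Int :=
  if se.2 - se.1 > p.2 - p.1 then se else p

def longestOppositeSignsSubSeq_alt (nums : List Int) : List Int :=
  if nums = [] then []
  else
    let n : Int := nums.length
    let starts := 0 :: (PySem.List.pyRange 1 n 1).filter (altBreak nums)
    let ends := starts.drop 1 ++ [n]
    let best := (starts.zip ends).foldl stepB (0, 0)
    PySem.List.slice nums (some best.1) (some best.2)

-- ===== PRECONDITION & SPEC =====
def Spec_longestOppositeSignsSubSeq (nums : List Int) (out : List Int) : Prop := out = longestOppositeSignsSubSeq_alt nums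
instance (nums : List Int) (out : List Int) : Decidable (Spec_longestOppositeSignsSubSeq nums out) := by unfold Spec_longestOppositeSignsSubSeq; infer_instance

-- ===== CLAIM (what is proved, stated in full; the proofs are below) =====
def Claim_equal_longestOppositeSignsSubSeq : Prop := ∀ (nums : List Int), Dom_longestOppositeSignsSubSeq nums → Spec_longestOppositeSignsSubSeq nums (longestOppositeSignsSubSeq nums)

-- ===== LEMMAS AND PROOFS =====

-- segment starts determined by the first k positions (k ≥ 1): 0 plus the breaks in [1, k)
def startsUpTo (nums : List Int) (k : Int) : List Int :=
  0 :: (PySem.List.pyRange 1 k 1).filter (altBreak nums)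

lemma condA_iff (nums : List Int) (i : Int) :
    ((PySem.List.pyGetD nums i 0 < 0 ∧ 0 ≤ PySem.List.pyGetD nums (i - 1) 0) ∨
     (0 ≤ PySem.List.pyGetD nums i 0 ∧ PySem.List.pyGetD nums (i - 1) 0 < 0)) ↔
    altBreak nums i = false := by
  simp [altBreak]
  omega

lemma zip_tail_append (l : List Int) (S k : Int) (h : l.getLast? = some S) :
    (l ++ [k]).zip (l ++ [k]).tail = l.zip l.tail ++ [(S, k)] := by
  induction l with
  | nil => simp at h
  | cons x t ih =>
    cases t with
    | nil => simp at h; simp [h]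
    | cons y t' =>
      have h' : (y :: t').getLast? = some S := by simpa using h
      have := ih h'
      simp only [List.cons_append, List.tail_cons, List.zip_cons_cons] at *
      simp [this]

lemma zip_tail_snoc (l : List Int) (S n : Int) (h : l.getLast? = some S) :
    l.zip (l.tail ++ [n]) = l.zip l.tail ++ [(S, n)] := by
  induction l with
  | nil => simp at h
  | cons x t ih =>
    cases t with
    | nil => simp at h; simp [h]
    | cons y t' =>
      have h' : (y :: t').getLast? = some S := by simpa using h
      have := ih h'
      simp only [List.tail_cons, List.cons_append, List.zip_cons_cons] at *
      simp [this]

lemma foldA_inv (nums : List Int) (k : Int) (h1 : 1 ≤ k) :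
    ∃ S M SM,
      (PySem.List.pyRange 1 k 1).foldl (stepA nums) (0, 1, 0, 0) = (M, k - S, S, SM) ∧
      (startsUpTo nums k).getLast? = some S ∧
      ((startsUpTo nums k).zip (startsUpTo nums k).tail).foldl stepB (0, 0) = (SM, SM + M) := by
  induction k, h1 using Int.le_induction with
  | base =>
    refine ⟨0, 0, 0, ?_, ?_, ?_⟩ <;>
      simp [PySem.List.pyRange_one_eq_nil (le_refl (1 : Int)), startsUpTo]
  | succ k hk ih =>
    obtain ⟨S, M, SM, hA, hL, hB⟩ := ih
    have hrange : PySem.List.pyRange 1 (k + 1) 1 = PySem.List.pyRange 1 k 1 ++ [k] :=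
      PySem.List.pyRange_one_succ_right hk
    have hstarts : startsUpTo nums (k + 1) =
        startsUpTo nums k ++ (if altBreak nums k then [k] else []) := by
      simp [startsUpTo, hrange, List.filter_append]
      split <;> simp_all
    by_cases hbr : altBreak nums k = true
    · -- break at k: new segment starts
      have hcond : ¬ ((PySem.List.pyGetD nums k 0 < 0 ∧ 0 ≤ PySem.List.pyGetD nums (k - 1) 0) ∨
          (0 ≤ PySem.List.pyGetD nums k 0 ∧ PySem.List.pyGetD nums (k - 1) 0 < 0)) := by
        rw [condA_iff]; simp [hbr]
      have hst : startsUpTo nums (k + 1) = startsUpTo nums k ++ [k] := by simp [hstarts, hbr]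
      have hz := zip_tail_append (startsUpTo nums k) S k hL
      by_cases hgt : k - S > M
      · refine ⟨k, k - S, S, ?_, ?_, ?_⟩
        · rw [hrange, List.foldl_append, hA]
          simp [stepA, hcond, hgt]
        · simp [hst]
        · rw [hst, hz, List.foldl_append, hB]
          simp [stepB]
          intro h; omega
      · refine ⟨k, M, SM, ?_, ?_, ?_⟩
        · rw [hrange, List.foldl_append, hA]
          simp [stepA, hcond, hgt]
        · simp [hst]
        · rw [hst, hz, List.foldl_append, hB]
          simp [stepB]
          omega
    · -- no break at k: current segment extends
      have hcond : ((PySem.List.pyGetD nums k 0 < 0 ∧ 0 ≤ PySem.List.pyGetD nums (k - 1) 0) ∨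
          (0 ≤ PySem.List.pyGetD nums k 0 ∧ PySem.List.pyGetD nums (k - 1) 0 < 0)) := by
        rw [condA_iff]; simpa using hbr
      have hst : startsUpTo nums (k + 1) = startsUpTo nums k := by simp [hstarts, hbr]
      refine ⟨S, M, SM, ?_, ?_, ?_⟩
      · rw [hrange, List.foldl_append, hA]
        simp [stepA, hcond]
        omega
      · simp [hst, hL]
      · simp [hst, hB]

-- ===== VERDICT (by name: the statement is the Claim_ definition above) =====
theorem longestOppositeSignsSubSeq_spec : Claim_equal_longestOppositeSignsSubSeq := by
  intro nums _
  unfold Spec_longestOppositeSignsSubSeq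
  by_cases hne : nums = []
  · subst hne; decide
  · have hlen : 1 ≤ (nums.length : Int) := by
      have := List.length_pos_of_ne_nil hne; omega
    obtain ⟨S, M, SM, hA, hL, hB⟩ := foldA_inv nums (nums.length : Int) hlen
    unfold longestOppositeSignsSubSeq longestOppositeSignsSubSeq_alt
    rw [hA]
    simp only [hne, if_false]
    have hz := zip_tail_snoc (startsUpTo nums (nums.length : Int)) S (nums.length : Int) hL
    have hfold : ((0 : Int) :: (PySem.List.pyRange 1 (nums.length : Int) 1).filter (altBreak nums)).zip
        (((0 : Int) :: (PySem.List.pyRange 1 (nums.length : Int) 1).filter (altBreak nums)).drop 1 ++ [(nums.length : Int)]) =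
        (startsUpTo nums (nums.length : Int)).zip (startsUpTo nums (nums.length : Int)).tail ++ [(S, (nums.length : Int))] := by
      rw [← hz]; rfl
    rw [hfold, List.foldl_append, hB]
    by_cases hgt : (nums.length : Int) - S > M
    · simp [stepB, hgt]
    · simp [stepB, hgt]
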